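-- pv_equiv track=rewrite | github.com/henri-simmons/data-structures | wk1lab.py | move_vow
-- ===== SOURCE A (Python) =====
-- def move_vow(line):
--     v = ""
--     c = ""
--     vowels = ["a","e","i","o","u","A","E","I","O","U"]
--     for char in line:
--         if char in vowels:
--             v = v + char
--         else:
--             c = c + char
--     return v + c
-- ===== SOURCE B (Python) =====
-- def move_vow(line):
--     vowels = ["a","e","i","o","u","A","E","I","O","U"]
--     return "".join(sorted(line, key=lambda ch: ch not in vowels))
-- ===== Notes on version B (the rewrite author's own statement) =====
-- stated objective: idiomatic
-- what changed: The two-accumulator string-concatenation partition loop is replaced by a single stable sort keyed on non-vowelness (sorted + ''.join); stability makes vowels precede consonants, each group in original order.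
import Mathlib
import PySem

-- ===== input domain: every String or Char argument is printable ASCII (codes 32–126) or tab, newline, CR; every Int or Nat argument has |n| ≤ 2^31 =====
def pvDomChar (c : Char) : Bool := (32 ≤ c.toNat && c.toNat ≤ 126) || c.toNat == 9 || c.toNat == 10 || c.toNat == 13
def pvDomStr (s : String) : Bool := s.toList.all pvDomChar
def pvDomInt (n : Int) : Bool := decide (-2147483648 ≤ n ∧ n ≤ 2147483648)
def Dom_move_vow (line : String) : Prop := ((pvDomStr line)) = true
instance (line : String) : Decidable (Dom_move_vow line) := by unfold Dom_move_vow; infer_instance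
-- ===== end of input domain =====

-- B replaces the two-accumulator partition loop by one stable sort keyed on non-vowelness (same result, different algorithm; not claimed faster).


-- ===== PORT A =====
def pvVowels : List Char := ['a','e','i','o','u','A','E','I','O','U']

def move_vow (line : String) : String :=
  let r := line.toList.foldl
    (fun (acc : List Char × List Char) char =>
      if char ∈ pvVowels then (acc.1 ++ [char], acc.2) else (acc.1, acc.2 ++ [char]))
    ([], [])
  String.ofList (r.1 ++ r.2)

-- ===== PORT B =====
def move_vow_alt (line : String) : String :=
  String.ofList (PySem.List.sorted line.toList (fun ch => decide (ch ∉ pvVowels)) false)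

-- ===== PRECONDITION & SPEC =====
def Spec_move_vow (line : String) (out : String) : Prop := out = move_vow_alt line
instance (line : String) (out : String) : Decidable (Spec_move_vow line out) := by unfold Spec_move_vow; infer_instance

-- ===== CLAIM (what is proved, stated in full; the proofs are below) =====
def Claim_equal_move_vow : Prop := ∀ (line : String), Dom_move_vow line → Spec_move_vow line (move_vow line)

-- ===== LEMMAS AND PROOFS =====

-- Inserting x before exactly the elements of cs (and after all of vs) lands between them.
lemma insertBy_mid {α : Type} (before : α → α → Bool) (x : α) (vs cs : List α)
    (hv : ∀ v ∈ vs, before x v = false) (hc : ∀ c ∈ cs, before x c = true) :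
    PySem.List.insertBy before x (vs ++ cs) = vs ++ x :: cs := by
  induction vs with
  | nil =>
    cases cs with
    | nil => simp [PySem.List.insertBy]
    | cons c t => simp [PySem.List.insertBy, hc c (by simp)]
  | cons v vs ih =>
    have hb : before x v = false := hv v (by simp)
    simp only [List.cons_append, PySem.List.insertBy, hb]
    simp [ih (fun y hy => hv y (by simp [hy]))]

-- Invariant of the stable insertion sort with a Bool key: it maintains the partition.
lemma sort_fold_partition (key : Char → Bool) (xs : List Char) :
    ∀ vs cs : List Char, (∀ v ∈ vs, key v = false) → (∀ c ∈ cs, key c = true) →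
    xs.foldl (fun acc x => PySem.List.insertBy (fun a b => decide (key a < key b)) x acc) (vs ++ cs)
      = (vs ++ xs.filter (fun x => !key x)) ++ (cs ++ xs.filter key) := by
  induction xs with
  | nil => intro vs cs _ _; simp
  | cons x xs ih =>
    intro vs cs hv hc
    by_cases hx : key x = true
    · have h1 : PySem.List.insertBy (fun a b => decide (key a < key b)) x (vs ++ cs)
          = (vs ++ cs) ++ [x] := by
        apply PySem.List.insertBy_of_forall_not_before
        intro y _; simp [hx, Bool.lt_iff]
      have h2 := ih vs (cs ++ [x]) hv (by
        intro c hcm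
        rcases List.mem_append.mp hcm with h | h
        · exact hc c h
        · simp at h; simpa [h])
      simp only [List.foldl_cons, h1, List.append_assoc] at h2 ⊢
      rw [h2]
      simp [hx, List.filter_cons]
    · have hx' : key x = false := by simpa using hx
      have h1 : PySem.List.insertBy (fun a b => decide (key a < key b)) x (vs ++ cs)
          = vs ++ x :: cs := by
        apply insertBy_mid
        · intro v hvm; simp [hx', hv v hvm]
        · intro c hcm; simp [hx', hc c hcm, Bool.lt_iff]
      have h2 := ih (vs ++ [x]) cs (by
        intro v hvm
        rcases List.mem_append.mp hvm with h | h
        · exact hv v h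
        · simp at h; simpa [h]) hc
      simp only [List.foldl_cons, h1]
      rw [show vs ++ x :: cs = (vs ++ [x]) ++ cs by simp] at *
      rw [h2]
      simp [hx']

-- A's two-accumulator loop computes the two filters.
lemma a_fold (xs : List Char) : ∀ v c : List Char,
    xs.foldl (fun (acc : List Char × List Char) char =>
        if char ∈ pvVowels then (acc.1 ++ [char], acc.2) else (acc.1, acc.2 ++ [char])) (v, c)
      = (v ++ xs.filter (fun x => decide (x ∈ pvVowels)),
         c ++ xs.filter (fun x => !decide (x ∈ pvVowels))) := by
  induction xs with
  | nil => intro v c; simp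
  | cons x xs ih =>
    intro v c
    by_cases hx : x ∈ pvVowels <;> simp [hx, ih]

-- ===== VERDICT (by name: the statement is the Claim_ definition above) =====
theorem move_vow_spec : Claim_equal_move_vow := by
  intro line _
  show move_vow line = move_vow_alt line
  unfold move_vow move_vow_alt
  rw [PySem.List.sorted_eq_foldl_insertBy]
  have h := sort_fold_partition (fun ch => decide (ch ∉ pvVowels)) line.toList [] []
    (by simp) (by simp)
  simp only [List.nil_append, List.append_nil] at h
  rw [h, a_fold]
  simp
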